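-- pv_equiv track=rewrite | github.com/alexandraback/datacollection | solutions_5738606668808192_1/Python/graf/code_big.py | find_cert_b
-- ===== SOURCE A (Python) =====
-- def find_cert_b(x, base):
--     for i in [2,3,5,7,11,13]: #int(x**0.5 +1)):
--         res = 0
--         for t in x:
--             res = (res * base + t) % i
--         if res == 0:
--             return i
--     return -1
-- ===== SOURCE B (Python) =====
-- def find_cert_b(x, base):
--     # Reconstruct the exact integer encoded by the digits by divide and conquer:
--     # value(x) = value(left) * base**len(right) + value(right) on a balanced split.
--     # Then return the first listed prime dividing that single value, else -1.
--     def build(lo, hi):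
--         # returns (value of x[lo:hi], base**(hi-lo))
--         if hi - lo == 0:
--             return 0, 1
--         if hi - lo == 1:
--             return x[lo], base
--         mid = (lo + hi) // 2
--         lv, lp = build(lo, mid)
--         rv, rp = build(mid, hi)
--         return lv * rp + rv, lp * rp
--     total = build(0, len(x))[0]
--     for p in (2, 3, 5, 7, 11, 13):
--         if total % p == 0:
--             return p
--     return -1
-- ===== Notes on version B (the rewrite author's own statement) =====
-- stated objective: alternative
-- what changed: A runs a modular Horner scan of the digit list once per prime with an early return; B uses no modular arithmetic at all: it reconstructs the exact big integer by divide and conquer on a balanced split (value(l)*base^len(r)+value(r)) and then tests the six primes for divisibility of that single value.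
import Mathlib
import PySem

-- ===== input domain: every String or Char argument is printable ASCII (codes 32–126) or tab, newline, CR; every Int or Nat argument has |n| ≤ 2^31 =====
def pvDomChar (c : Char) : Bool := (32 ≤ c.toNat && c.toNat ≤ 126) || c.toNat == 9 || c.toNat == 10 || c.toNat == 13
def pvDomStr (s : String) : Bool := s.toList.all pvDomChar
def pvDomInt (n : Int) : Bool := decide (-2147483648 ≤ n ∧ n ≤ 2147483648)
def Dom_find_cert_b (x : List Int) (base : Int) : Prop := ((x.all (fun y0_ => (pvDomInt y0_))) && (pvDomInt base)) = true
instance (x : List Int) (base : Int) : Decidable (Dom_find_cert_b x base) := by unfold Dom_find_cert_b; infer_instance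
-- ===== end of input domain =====

-- B drops modular arithmetic entirely: it rebuilds the exact encoded integer by divide and conquer on a balanced split, then tests the six primes for divisibility (alternative algorithm, same result).

-- ===== PORT A =====
-- A: outer loop over the prime list; inner fold over digits computes the modular Horner residue; early return on 0.
def pvA_loop (x : List Int) (base : Int) : List Int → Int
  | [] => -1
  | i :: rest =>
    if x.foldl (fun res t => PySem.Int.mod (res * base + t) i) 0 = 0 then i
    else pvA_loop x base rest

def find_cert_b (x : List Int) (base : Int) : Int :=
  pvA_loop x base [2, 3, 5, 7, 11, 13]

-- ===== PORT B =====
-- B's build(lo, hi): recursion on the slice x[lo:hi] itself; returns (value of slice, base ^ slice length).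
-- (the Nat argument is only a structural-termination fuel, always called with the slice length)
def pvB_build (base : Int) : Nat → List Int → Int × Int
  | _, [] => (0, 1)
  | _, [t] => (t, base)
  | fuel + 1, a :: b :: rest =>
    let lr := pvB_build base fuel ((a :: b :: rest).take ((a :: b :: rest).length / 2))
    let rr := pvB_build base fuel ((a :: b :: rest).drop ((a :: b :: rest).length / 2))
    (lr.1 * rr.2 + rr.1, lr.2 * rr.2)
  | 0, _ => (0, 1)

-- B: first listed prime dividing the reconstructed value, else -1.
def pvB_pick (total : Int) : List Int → Int
  | [] => -1
  | p :: rest => if PySem.Int.mod total p = 0 then p else pvB_pick total rest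

def find_cert_b_alt (x : List Int) (base : Int) : Int :=
  pvB_pick (pvB_build base x.length x).1 [2, 3, 5, 7, 11, 13]

-- ===== PRECONDITION & SPEC =====
def Spec_find_cert_b (x : List Int) (base : Int) (out : Int) : Prop := out = find_cert_b_alt x base
instance (x : List Int) (base : Int) (out : Int) : Decidable (Spec_find_cert_b x base out) := by unfold Spec_find_cert_b; infer_instance

-- ===== CLAIM (what is proved, stated in full; the proofs are below) =====
def Claim_equal_find_cert_b : Prop := ∀ (x : List Int) (base : Int), Dom_find_cert_b x base → Spec_find_cert_b x base (find_cert_b x base)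

-- ===== LEMMAS AND PROOFS =====

-- Plain Horner fold: shifting the accumulator multiplies in a power of the base.
theorem pvHorner_shift (base : Int) (x : List Int) (a : Int) :
    x.foldl (fun r t => r * base + t) a
      = a * base ^ x.length + x.foldl (fun r t => r * base + t) 0 := by
  induction x generalizing a with
  | nil => simp
  | cons t xs ih =>
    simp only [List.foldl_cons, List.length_cons]
    rw [ih (a * base + t), ih (0 * base + t)]
    ring

-- B's divide-and-conquer build computes exactly (Horner value, base ^ length), given enough fuel.
theorem pvB_build_eq (base : Int) (fuel : Nat) (l : List Int) (h : l.length ≤ fuel) :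
    pvB_build base fuel l = (l.foldl (fun r t => r * base + t) 0, base ^ l.length) := by
  induction fuel generalizing l with
  | zero =>
    have hnil : l = [] := by cases l <;> simp_all
    subst hnil; simp [pvB_build]
  | succ f ih =>
    rcases l with _ | ⟨a, _ | ⟨b, rest⟩⟩
    · simp [pvB_build]
    · simp [pvB_build]
    rw [pvB_build]
    rw [ih _ (by simp only [List.length_take, List.length_cons] at *; omega),
        ih _ (by simp only [List.length_drop, List.length_cons] at *; omega)]
    have hsplit : (a :: b :: rest) =
        ((a :: b :: rest).take ((a :: b :: rest).length / 2))
          ++ ((a :: b :: rest).drop ((a :: b :: rest).length / 2)) := by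
      simp
    rw [Prod.mk.injEq]
    constructor
    · conv_rhs => rw [hsplit]
      rw [List.foldl_append,
        pvHorner_shift base ((a :: b :: rest).drop ((a :: b :: rest).length / 2))
          (((a :: b :: rest).take ((a :: b :: rest).length / 2)).foldl
            (fun r t => r * base + t) 0)]
    · conv_rhs => rw [hsplit]
      rw [List.length_append, pow_add]

-- A's modular Horner fold is the plain Horner value reduced mod i (i > 0).
theorem pvA_mod_fold (base i : Int) (hi : 0 < i) (x : List Int) (a : Int) :
    x.foldl (fun res t => PySem.Int.mod (res * base + t) i) (PySem.Int.mod a i)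
      = PySem.Int.mod (x.foldl (fun r t => r * base + t) a) i := by
  induction x generalizing a with
  | nil => simp
  | cons t xs ih =>
    simp only [List.foldl_cons]
    rw [← ih (a * base + t)]
    congr 1
    simp only [PySem.Int.mod_eq_emod_of_pos hi]
    conv_rhs => rw [Int.add_emod, Int.mul_emod]
    rw [Int.add_emod, Int.mul_emod, Int.emod_emod_of_dvd _ dvd_rfl]

-- The two prime scans agree once each residue test is rewritten to a divisibility test of the total.
theorem pvScan_eq (x : List Int) (base : Int) (ps : List Int) (hps : ∀ p ∈ ps, 0 < p) :
    pvA_loop x base ps = pvB_pick (x.foldl (fun r t => r * base + t) 0) ps := by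
  induction ps with
  | nil => rfl
  | cons p rest ih =>
    have hp : 0 < p := hps p (List.mem_cons_self ..)
    have h0 : PySem.Int.mod 0 p = 0 := by
      simp [PySem.Int.mod_eq_emod_of_pos hp]
    simp only [pvA_loop, pvB_pick]
    rw [← h0, pvA_mod_fold base p hp x 0, h0,
      ih (fun q hq => hps q (List.mem_cons_of_mem _ hq))]

-- ===== VERDICT (by name: the statement is the Claim_ definition above) =====
theorem find_cert_b_spec : Claim_equal_find_cert_b := by
  intro x base _
  show find_cert_b x base = find_cert_b_alt x base
  rw [find_cert_b, find_cert_b_alt]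
  rw [pvB_build_eq base x.length x le_rfl]
  exact pvScan_eq x base _ (by decide)
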